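-- pv_equiv track=rewrite | github.com/alejanndrasan/Proyecto | Modulo3.py | fix_stock_drinks
-- ===== SOURCE A (Python) =====
-- def fix_stock_drinks(amount): #Esta funcion divide la cnatidad de bebidas en tres partes, es una division entera, si la cantidad no es multiplo de tres, le suma el residuo al elemento del medio (seria el precio para las bebidas medianas).
--     lista = []
--     c = amount
--     for n in range(3):
--         x = amount // 3
--         lista.append(x)
--         c -= x
--
--     if amount%3 != 0:
--         lista[1] += c
--     return lista
-- ===== SOURCE B (Python) =====
-- def fix_stock_drinks(amount):
--     q, r = divmod(amount, 3)
--     return [q, q + r, q]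
-- ===== Notes on version B (the rewrite author's own statement) =====
-- stated objective: simpler
-- what changed: Replace the 3-iteration append loop with running residual subtraction and the post-hoc middle fix-up by a single divmod closed form returning [q, q+r, q] directly.
import Mathlib
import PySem

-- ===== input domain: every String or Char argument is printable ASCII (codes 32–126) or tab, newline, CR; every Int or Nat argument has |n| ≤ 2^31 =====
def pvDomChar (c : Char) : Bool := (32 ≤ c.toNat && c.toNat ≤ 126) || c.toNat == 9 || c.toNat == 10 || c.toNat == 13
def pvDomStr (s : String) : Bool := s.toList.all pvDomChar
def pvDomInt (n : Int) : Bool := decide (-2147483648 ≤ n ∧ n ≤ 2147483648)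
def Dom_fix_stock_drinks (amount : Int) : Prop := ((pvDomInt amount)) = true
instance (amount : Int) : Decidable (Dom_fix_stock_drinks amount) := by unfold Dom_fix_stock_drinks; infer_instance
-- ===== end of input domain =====

-- ===== PORT A =====
-- B replaces A's 3-iteration loop + middle fix-up by a direct divmod closed form (simpler).
def fix_stock_drinks (amount : Int) : List Int :=
  let st := (PySem.List.pyRange 0 3 1).foldl
    (fun (st : List Int × Int) (_ : Int) =>
      let x := PySem.Int.floordiv amount 3
      (st.1 ++ [x], st.2 - x)) ([], amount)
  if PySem.Int.mod amount 3 != 0 then st.1.modify 1 (· + st.2) else st.1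

-- ===== PORT B =====
def fix_stock_drinks_alt (amount : Int) : List Int :=
  let q := PySem.Int.floordiv amount 3
  let r := PySem.Int.mod amount 3
  [q, q + r, q]

-- ===== PRECONDITION & SPEC =====
def Spec_fix_stock_drinks (amount : Int) (out : List Int) : Prop := out = fix_stock_drinks_alt amount
instance (amount : Int) (out : List Int) : Decidable (Spec_fix_stock_drinks amount out) := by unfold Spec_fix_stock_drinks; infer_instance

-- ===== CLAIM (what is proved, stated in full; the proofs are below) =====
def Claim_equal_fix_stock_drinks : Prop := ∀ (amount : Int), Dom_fix_stock_drinks amount → Spec_fix_stock_drinks amount (fix_stock_drinks amount)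

-- ===== LEMMAS AND PROOFS =====

-- ===== VERDICT (by name: the statement is the Claim_ definition above) =====
theorem fix_stock_drinks_spec : Claim_equal_fix_stock_drinks := by
  intro amount _
  unfold Spec_fix_stock_drinks fix_stock_drinks fix_stock_drinks_alt
  have hr : PySem.List.pyRange 0 3 1 = [0, 1, 2] := by decide
  have hd : PySem.Int.floordiv amount 3 = amount / 3 :=
    PySem.Int.floordiv_eq_ediv_of_pos (by norm_num)
  have hmod : PySem.Int.mod amount 3 = amount % 3 :=
    PySem.Int.mod_eq_emod_of_pos (by norm_num)
  rw [hr]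
  simp only [hd, hmod, List.foldl]
  by_cases hm : amount % 3 = 0
  · simp [hm]
  · have hb : (amount % 3 != 0) = true := by simpa using hm
    simp [hb, List.modify]
    omega
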